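-- pv_equiv track=rewrite | github.com/pablokan/prog1 | alumnos/practico6/scala.py | consignaDos
-- ===== SOURCE A (Python) =====
-- movies = ["Das boot(1981)act", "Blade Runner(1982)sf", "Arrival(2016)sf",
-- "Dumb & Dumber(1994)com", "Blade Runner 2049(2015)sf",
-- "Three Kings(1999)act", "The green hornet(2011)com"
-- ]
--
-- def consignaDos(año):
--     c = 0
--     for a in range(len(movies)):
--         posParentesis = movies[a].find('(')
--         if posParentesis != -1:
--             f = movies[a].find(')')
--             añoEstreno = int(movies[a][posParentesis+1:f])
--             if int(año) > añoEstreno: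
--                 c = c + 1
--     return c
-- ===== SOURCE B (Python) =====
-- movies = ["Das boot(1981)act", "Blade Runner(1982)sf", "Arrival(2016)sf",
-- "Dumb & Dumber(1994)com", "Blade Runner 2049(2015)sf",
-- "Three Kings(1999)act", "The green hornet(2011)com"
-- ]
--
-- # Release years parsed once at import time and kept sorted.
-- _years = sorted(int(m[m.find('(') + 1:m.find(')')]) for m in movies)
--
-- def consignaDos(año):
--     t = int(año)
--     # bisect_left over the sorted year table: number of years strictly below t
--     lo, hi = 0, len(_years)
--     while lo < hi:
--         mid = (lo + hi) // 2
--         if _years[mid] < t: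
--             lo = mid + 1
--         else:
--             hi = mid
--     return lo
-- ===== Notes on version B (the rewrite author's own statement) =====
-- stated objective: alternative
-- what changed: B parses the release years once at import time into a sorted table and answers each query with a hand-written bisect_left binary search, instead of A's per-call scan over the movie strings with find/slice/int on every element.
import Mathlib
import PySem

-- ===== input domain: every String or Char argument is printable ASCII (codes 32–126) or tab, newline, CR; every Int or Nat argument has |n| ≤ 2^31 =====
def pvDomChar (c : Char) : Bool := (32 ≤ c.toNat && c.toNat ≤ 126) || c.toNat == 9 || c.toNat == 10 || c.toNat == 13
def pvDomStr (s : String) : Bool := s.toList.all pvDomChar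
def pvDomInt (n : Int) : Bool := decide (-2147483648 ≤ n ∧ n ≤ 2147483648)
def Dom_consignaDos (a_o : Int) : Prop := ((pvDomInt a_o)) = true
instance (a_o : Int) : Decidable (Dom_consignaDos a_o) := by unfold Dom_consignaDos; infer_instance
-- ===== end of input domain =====

-- B replaces A's per-call scan over the movie strings by an import-time sorted year
-- table plus a hand-written binary search (bisect_left); objective: alternative.

-- ===== PORT A =====
def pvMovies : List String := ["Das boot(1981)act", "Blade Runner(1982)sf", "Arrival(2016)sf",
  "Dumb & Dumber(1994)com", "Blade Runner 2049(2015)sf",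
  "Three Kings(1999)act", "The green hornet(2011)com"]

def consignaDos (a_o : Int) : Int :=
  (PySem.List.pyRange 0 (pvMovies.length : Int) 1).foldl
    (fun c a =>
      let m := PySem.List.pyGetD pvMovies a ""   -- movies[a]; a ∈ range(len(movies)), always in range
      let posParentesis := PySem.Str.find m "("
      if posParentesis ≠ -1 then
        let f := PySem.Str.find m ")"
        -- int(...) never raises here: every movie literal carries "(year)"
        let a_oEstreno := (PySem.Int.ofStr? (PySem.Str.slice m (some (posParentesis + 1)) (some f))).getD 0
        if a_o > a_oEstreno then c + 1 else c
      else c) 0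

-- ===== PORT B =====
-- _years: parsed once, sorted (import-time constant of Source B)
def pvYears : List Int :=
  PySem.List.sorted
    (pvMovies.map (fun m =>
      (PySem.Int.ofStr? (PySem.Str.slice m (some (PySem.Str.find m "(" + 1)) (some (PySem.Str.find m ")")))).getD 0))
    (fun x => x)

-- the while-loop of Source B's hand-written bisect_left, recursion on hi - lo
def pvBisect (t : Int) (lo hi : Nat) : Nat :=
  if _h : lo < hi then
    let mid := (lo + hi) / 2
    if PySem.List.pyGetD pvYears (mid : Int) 0 < t then pvBisect t (mid + 1) hi
    else pvBisect t lo mid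
  else lo
termination_by hi - lo
decreasing_by all_goals omega

def consignaDos_alt (a_o : Int) : Int :=
  let t := a_o
  (pvBisect t 0 pvYears.length : Int)

-- ===== PRECONDITION & SPEC =====
def Spec_consignaDos (a_o : Int) (out : Int) : Prop := out = consignaDos_alt a_o
instance (a_o : Int) (out : Int) : Decidable (Spec_consignaDos a_o out) := by unfold Spec_consignaDos; infer_instance

-- ===== CLAIM (what is proved, stated in full; the proofs are below) =====
def Claim_equal_consignaDos : Prop := ∀ (a_o : Int), Dom_consignaDos a_o → Spec_consignaDos a_o (consignaDos a_o)

-- ===== LEMMAS AND PROOFS =====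

lemma body_eval (m : String) (y : Int)
    (hf : PySem.Str.find m "(" ≠ -1)
    (hy : (PySem.Int.ofStr? (PySem.Str.slice m (some (PySem.Str.find m "(" + 1)) (some (PySem.Str.find m ")")))).getD 0 = y)
    (a_o c : Int) :
    (if PySem.Str.find m "(" ≠ -1 then
       if a_o > (PySem.Int.ofStr? (PySem.Str.slice m (some (PySem.Str.find m "(" + 1)) (some (PySem.Str.find m ")")))).getD 0
       then c + 1 else c
     else c)
    = if y < a_o then c + 1 else c := by
  rw [if_pos hf, hy]

lemma A_eval (a_o : Int) : consignaDos a_o =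
    (if 1981 < a_o then 1 else 0) + (if 1982 < a_o then 1 else 0) + (if 2016 < a_o then 1 else 0) +
    (if 1994 < a_o then 1 else 0) + (if 2015 < a_o then 1 else 0) + (if 1999 < a_o then 1 else 0) +
    (if 2011 < a_o then 1 else 0) := by
  simp only [consignaDos]
  rw [show (PySem.List.pyRange 0 (pvMovies.length : Int) 1) = [0,1,2,3,4,5,6] from by decide]
  simp only [List.foldl_cons, List.foldl_nil,
    show PySem.List.pyGetD pvMovies 0 "" = "Das boot(1981)act" from by decide,
    show PySem.List.pyGetD pvMovies 1 "" = "Blade Runner(1982)sf" from by decide,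
    show PySem.List.pyGetD pvMovies 2 "" = "Arrival(2016)sf" from by decide,
    show PySem.List.pyGetD pvMovies 3 "" = "Dumb & Dumber(1994)com" from by decide,
    show PySem.List.pyGetD pvMovies 4 "" = "Blade Runner 2049(2015)sf" from by decide,
    show PySem.List.pyGetD pvMovies 5 "" = "Three Kings(1999)act" from by decide,
    show PySem.List.pyGetD pvMovies 6 "" = "The green hornet(2011)com" from by decide]
  rw [body_eval _ 2011 (by decide) (by decide),
      body_eval _ 1999 (by decide) (by decide),
      body_eval _ 2015 (by decide) (by decide),
      body_eval _ 1994 (by decide) (by decide),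
      body_eval _ 2016 (by decide) (by decide),
      body_eval _ 1982 (by decide) (by decide),
      body_eval _ 1981 (by decide) (by decide)]
  split_ifs <;> omega

lemma bis_step (t : Int) (lo hi mid : Nat) (y : Int) (h : lo < hi)
    (hm : (lo + hi) / 2 = mid) (hy : PySem.List.pyGetD pvYears (mid : Int) 0 = y) :
    pvBisect t lo hi = if y < t then pvBisect t (mid + 1) hi else pvBisect t lo mid := by
  rw [pvBisect]
  simp only [h, hm, hy, dif_pos]

lemma bis_end (t : Int) (lo hi : Nat) (h : ¬ lo < hi) : pvBisect t lo hi = lo := by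
  rw [pvBisect]
  simp only [h, dite_false]

-- ===== VERDICT (by name: the statement is the Claim_ definition above) =====
set_option maxHeartbeats 1600000 in
theorem consignaDos_spec : Claim_equal_consignaDos := by
  intro a_o _
  unfold Spec_consignaDos consignaDos_alt
  rw [A_eval a_o, show pvYears.length = 7 from by decide]
  show _ = ((pvBisect a_o 0 7 : Nat) : Int)
  rcases le_or_gt a_o 1981 with h1 | h1
  · rw [bis_step _ 0 7 3 1999 (by omega) (by decide) (by decide),
        if_neg (show ¬ 1999 < a_o by omega),
        bis_step _ 0 3 1 1982 (by omega) (by decide) (by decide),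
        if_neg (show ¬ 1982 < a_o by omega),
        bis_step _ 0 1 0 1981 (by omega) (by decide) (by decide),
        if_neg (show ¬ 1981 < a_o by omega),
        bis_end a_o 0 0 (by omega)]
    split_ifs <;> omega
  rcases le_or_gt a_o 1982 with h2 | h2
  · rw [bis_step _ 0 7 3 1999 (by omega) (by decide) (by decide),
        if_neg (show ¬ 1999 < a_o by omega),
        bis_step _ 0 3 1 1982 (by omega) (by decide) (by decide),
        if_neg (show ¬ 1982 < a_o by omega),
        bis_step _ 0 1 0 1981 (by omega) (by decide) (by decide),
        if_pos (show 1981 < a_o by omega),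
        bis_end a_o (0+1) 1 (by omega)]
    split_ifs <;> omega
  rcases le_or_gt a_o 1994 with h3 | h3
  · rw [bis_step _ 0 7 3 1999 (by omega) (by decide) (by decide),
        if_neg (show ¬ 1999 < a_o by omega),
        bis_step _ 0 3 1 1982 (by omega) (by decide) (by decide),
        if_pos (show 1982 < a_o by omega),
        bis_step _ 2 3 2 1994 (by omega) (by decide) (by decide),
        if_neg (show ¬ 1994 < a_o by omega),
        bis_end a_o 2 2 (by omega)]
    split_ifs <;> omega
  rcases le_or_gt a_o 1999 with h4 | h4
  · rw [bis_step _ 0 7 3 1999 (by omega) (by decide) (by decide),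
        if_neg (show ¬ 1999 < a_o by omega),
        bis_step _ 0 3 1 1982 (by omega) (by decide) (by decide),
        if_pos (show 1982 < a_o by omega),
        bis_step _ 2 3 2 1994 (by omega) (by decide) (by decide),
        if_pos (show 1994 < a_o by omega),
        bis_end a_o (2+1) 3 (by omega)]
    split_ifs <;> omega
  rcases le_or_gt a_o 2011 with h5 | h5
  · rw [bis_step _ 0 7 3 1999 (by omega) (by decide) (by decide),
        if_pos (show 1999 < a_o by omega),
        bis_step _ 4 7 5 2015 (by omega) (by decide) (by decide),
        if_neg (show ¬ 2015 < a_o by omega),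
        bis_step _ 4 5 4 2011 (by omega) (by decide) (by decide),
        if_neg (show ¬ 2011 < a_o by omega),
        bis_end a_o 4 4 (by omega)]
    split_ifs <;> omega
  rcases le_or_gt a_o 2015 with h6 | h6
  · rw [bis_step _ 0 7 3 1999 (by omega) (by decide) (by decide),
        if_pos (show 1999 < a_o by omega),
        bis_step _ 4 7 5 2015 (by omega) (by decide) (by decide),
        if_neg (show ¬ 2015 < a_o by omega),
        bis_step _ 4 5 4 2011 (by omega) (by decide) (by decide),
        if_pos (show 2011 < a_o by omega),
        bis_end a_o (4+1) 5 (by omega)]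
    split_ifs <;> omega
  rcases le_or_gt a_o 2016 with h7 | h7
  · rw [bis_step _ 0 7 3 1999 (by omega) (by decide) (by decide),
        if_pos (show 1999 < a_o by omega),
        bis_step _ 4 7 5 2015 (by omega) (by decide) (by decide),
        if_pos (show 2015 < a_o by omega),
        bis_step _ 6 7 6 2016 (by omega) (by decide) (by decide),
        if_neg (show ¬ 2016 < a_o by omega),
        bis_end a_o 6 6 (by omega)]
    split_ifs <;> omega
  · rw [bis_step _ 0 7 3 1999 (by omega) (by decide) (by decide),
        if_pos (show 1999 < a_o by omega),
        bis_step _ 4 7 5 2015 (by omega) (by decide) (by decide),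
        if_pos (show 2015 < a_o by omega),
        bis_step _ 6 7 6 2016 (by omega) (by decide) (by decide),
        if_pos (show 2016 < a_o by omega),
        bis_end a_o (6+1) 7 (by omega)]
    split_ifs <;> omega
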